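-- pv_equiv track=rewrite | github.com/HMFlol/AdventOfCode | 2024/Day2/day2.py | safe1
-- ===== SOURCE A (Python) =====
-- def safe1(reports):
--     safe_reports = []
--     for report in reports:
--         # I liked sorted. sorted is my friend. I also like reversing crap with ::-1. Oh.. I also really like zip. It zips! Teehee!
--         if (report == sorted(report) or report == sorted(report)[::-1]) and all(
--             1 <= abs(num1 - num2) <= 3 for num1, num2 in zip(report, report[1:])
--         ):
--             safe_reports.append(report)
--
--     return safe_reports
-- ===== SOURCE B (Python) =====
-- def safe1(reports):
--     # Single linear pass per report: track both candidate directions at once,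
--     # no sorting, no slicing, no extra lists.
--     safe_reports = []
--     for report in reports:
--         up = True
--         down = True
--         prev = None
--         for x in report:
--             if prev is not None:
--                 d = x - prev
--                 if not (1 <= d <= 3):
--                     up = False
--                 if not (-3 <= d <= -1):
--                     down = False
--             prev = x
--         if up or down:
--             safe_reports.append(report)
--     return safe_reports
-- ===== Notes on version B (the rewrite author's own statement) =====
-- stated objective: alternative
-- what changed: Replaces per-report sorting plus a zip-based abs-difference check with one linear pass that tracks both monotonic directions (diffs in [1,3] or in [-3,-1]) simultaneously.
import Mathlib
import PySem

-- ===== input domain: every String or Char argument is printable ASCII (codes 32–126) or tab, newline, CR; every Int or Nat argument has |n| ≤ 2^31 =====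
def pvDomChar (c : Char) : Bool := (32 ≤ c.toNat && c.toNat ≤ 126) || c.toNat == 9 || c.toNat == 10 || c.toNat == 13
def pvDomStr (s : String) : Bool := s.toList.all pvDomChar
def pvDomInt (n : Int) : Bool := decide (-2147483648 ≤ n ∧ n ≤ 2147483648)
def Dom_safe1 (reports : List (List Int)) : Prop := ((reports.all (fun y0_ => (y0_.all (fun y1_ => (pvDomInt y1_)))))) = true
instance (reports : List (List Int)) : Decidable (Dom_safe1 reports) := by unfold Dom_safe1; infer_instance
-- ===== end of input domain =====

-- B replaces per-report sorting + abs-diff zip check by one linear pass tracking both directions (alternative algorithm; equivalence proved below).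

-- ===== PORT A =====
-- the big condition of A's 'if', kept as a helper predicate
def predA (report : List Int) : Bool :=
  ((report == PySem.List.sorted report (fun x => x) false) ||
   (report == ((PySem.List.slice? (PySem.List.sorted report (fun x => x) false) none none (-1)).getD []))) &&
  ((report.zip (PySem.List.slice report (some 1) none)).all
    (fun p => decide (1 ≤ (p.1 - p.2).natAbs ∧ (p.1 - p.2).natAbs ≤ 3)))

def safe1 (reports : List (List Int)) : List (List Int) :=
  reports.foldl (fun safe_reports report =>
    if predA report then safe_reports ++ [report] else safe_reports) []

-- ===== PORT B =====
-- inner-loop body of B: state (up, down, prev)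
def stepB (st : Bool × Bool × Option Int) (x : Int) : Bool × Bool × Option Int :=
  match st with
  | (up, down, none) => (up, down, some x)
  | (up, down, some p) =>
      let d := x - p
      ((if 1 ≤ d ∧ d ≤ 3 then up else false),
       (if -3 ≤ d ∧ d ≤ -1 then down else false),
       some x)

def predB (report : List Int) : Bool :=
  let st := report.foldl stepB (true, true, none)
  st.1 || st.2.1

def safe1_alt (reports : List (List Int)) : List (List Int) :=
  reports.foldl (fun safe_reports report =>
    if predB report then safe_reports ++ [report] else safe_reports) []

-- ===== PRECONDITION & SPEC =====
def Spec_safe1 (reports : List (List Int)) (out : List (List Int)) : Prop := out = safe1_alt reports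
instance (reports : List (List Int)) (out : List (List Int)) : Decidable (Spec_safe1 reports out) := by unfold Spec_safe1; infer_instance

-- ===== CLAIM (what is proved, stated in full; the proofs are below) =====
def Claim_equal_safe1 : Prop := ∀ (reports : List (List Int)), Dom_safe1 reports → Spec_safe1 reports (safe1 reports)

-- ===== LEMMAS AND PROOFS =====

-- Boolean chain checks used to describe B's fold in closed form
def chainUpB : Int → List Int → Bool
  | _, [] => true
  | p, y :: ys => (decide (1 ≤ y - p ∧ y - p ≤ 3)) && chainUpB y ys

def chainDnB : Int → List Int → Bool
  | _, [] => true
  | p, y :: ys => (decide (-3 ≤ y - p ∧ y - p ≤ -1)) && chainDnB y ys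

theorem sorted_eq_iff (r : List Int) :
    PySem.List.sorted r (fun x => x) false = r ↔ r.Pairwise (· ≤ ·) := by
  constructor
  · intro h
    have := PySem.List.sorted_pairwise (xs := r) (key := fun x => x)
    rwa [h] at this
  · exact PySem.List.sorted_eq_self_of_pairwise r (fun x => x)

theorem sorted_rev_eq_iff (r : List Int) :
    (PySem.List.sorted r (fun x => x) false).reverse = r ↔ r.Pairwise (fun a b => b ≤ a) := by
  constructor
  · intro h
    rw [← h, List.pairwise_reverse]
    simpa using PySem.List.sorted_pairwise r (fun x => x)
  · intro h
    have : PySem.List.sorted r (fun x => x) false = r.reverse := by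
      refine PySem.List.sorted_id_eq_of_perm_of_pairwise r r.reverse r.reverse_perm ?_
      rwa [List.pairwise_reverse]
    rw [this, List.reverse_reverse]

theorem zip_tail_all (f : Int × Int → Bool) :
    ∀ (r : List Int), ((r.zip r.tail).all f = true ↔ List.IsChain (fun a b => f (a, b) = true) r)
  | [] => by simp
  | [x] => by simp
  | x :: y :: t => by
      have ih := zip_tail_all f (y :: t)
      simp only [List.tail_cons, List.zip_cons_cons, List.all_cons, List.isChain_cons_cons,
        Bool.and_eq_true] at *
      rw [ih]

-- B's inner fold computed in closed form
theorem foldB_closed : ∀ (xs : List Int) (p : Int) (up down : Bool),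
    xs.foldl stepB (up, down, some p) =
      (up && chainUpB p xs, down && chainDnB p xs, some (xs.getLastD p))
  | [], p, up, down => by simp [chainUpB, chainDnB]
  | y :: ys, p, up, down => by
      simp only [List.foldl_cons, stepB, foldB_closed ys y, chainUpB, chainDnB,
        List.getLastD_cons, Prod.mk.injEq]
      refine ⟨?_, ?_, trivial⟩
      · by_cases h : 1 ≤ y - p ∧ y - p ≤ 3 <;>
          simp [h, Bool.and_comm, Bool.and_left_comm]
      · by_cases h : -3 ≤ y - p ∧ y - p ≤ -1 <;>
          simp [h, Bool.and_comm, Bool.and_left_comm]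

theorem chainUpB_iff : ∀ (p : Int) (xs : List Int),
    chainUpB p xs = true ↔ List.IsChain (fun a b => 1 ≤ b - a ∧ b - a ≤ 3) (p :: xs)
  | _, [] => by simp [chainUpB]
  | p, y :: ys => by
      rw [List.isChain_cons_cons, chainUpB, ← chainUpB_iff y ys]
      simp

theorem chainDnB_iff : ∀ (p : Int) (xs : List Int),
    chainDnB p xs = true ↔ List.IsChain (fun a b => -3 ≤ b - a ∧ b - a ≤ -1) (p :: xs)
  | _, [] => by simp [chainDnB]
  | p, y :: ys => by
      rw [List.isChain_cons_cons, chainDnB, ← chainDnB_iff y ys]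
      simp

-- the two per-report conditions agree
theorem predA_eq_predB (r : List Int) : predA r = predB r := by
  rw [Bool.eq_iff_iff]
  have habs : ((r.zip (PySem.List.slice r (some 1) none)).all
      (fun p => decide (1 ≤ (p.1 - p.2).natAbs ∧ (p.1 - p.2).natAbs ≤ 3)) = true) ↔
      List.IsChain (fun a b : Int => 1 ≤ (a - b).natAbs ∧ (a - b).natAbs ≤ 3) r := by
    rw [PySem.List.slice_from_one, zip_tail_all]
    constructor <;> exact fun h => h.imp (by simp)
  cases r with
  | nil => decide
  | cons x xs =>
    simp only [predA, predB, List.foldl_cons, stepB, foldB_closed, Bool.true_and,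
      Bool.and_eq_true, Bool.or_eq_true, beq_iff_eq,
      PySem.List.slice?_none_none_neg_one, Option.getD_some, habs,
      chainUpB_iff, chainDnB_iff]
    constructor
    · rintro ⟨hm | hm, habs'⟩
      · left
        replace hm : (x :: xs).Pairwise (· ≤ ·) := (sorted_eq_iff _).mp hm.symm
        have hle := hm.isChain
        rw [List.isChain_iff_getElem] at habs' hle ⊢
        intro i hi
        have h1 := habs' i hi
        have h2 := hle i hi
        omega
      · right
        replace hm : (x :: xs).Pairwise (fun a b => b ≤ a) := (sorted_rev_eq_iff _).mp hm.symm
        have hle := hm.isChain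
        rw [List.isChain_iff_getElem] at habs' hle ⊢
        intro i hi
        have h1 := habs' i hi
        have h2 := hle i hi
        omega
    · rintro (h | h)
      · refine ⟨Or.inl ?_, h.imp (fun a b hab => by omega)⟩
        refine ((sorted_eq_iff _).mpr ?_).symm
        exact List.isChain_iff_pairwise.mp (h.imp (fun a b hab => by omega))
      · refine ⟨Or.inr ?_, h.imp (fun a b hab => by omega)⟩
        refine ((sorted_rev_eq_iff _).mpr ?_).symm
        exact List.isChain_iff_pairwise.mp (h.imp (fun a b hab => by omega))

theorem fold_eq : ∀ (reports : List (List Int)) (acc : List (List Int)),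
    reports.foldl (fun s r => if predA r then s ++ [r] else s) acc =
    reports.foldl (fun s r => if predB r then s ++ [r] else s) acc
  | [], _ => rfl
  | r :: rs, acc => by
      simp only [List.foldl_cons, predA_eq_predB r]
      exact fold_eq rs _

-- ===== VERDICT (by name: the statement is the Claim_ definition above) =====
theorem safe1_spec : Claim_equal_safe1 := by
  intro reports _
  unfold Spec_safe1 safe1 safe1_alt
  exact fold_eq reports []
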